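-- pv_equiv track=rewrite | github.com/hlmclgl/AI | pythonFundamentals/main.py | count_names_in_tables
-- ===== SOURCE A (Python) =====
-- name_counter = {}
--
-- def count_names_in_tables(table_to_count):
--     """
--     İlk sütunu kullanıcının adından oluşacak şekilde, bir tablo verisi alır
--     ve her bir kullanıcının tabloda kaç defa geçtiğini bulur.
--     ---
--     Girdi: Tablo (bir çok listeden oluşan bir liste)
--     Çıktı: Sözlük (İsimler key değerleri, kaç defa geçtikleri value değerleri)
--     """
--     name_counter = {}
--     for row in table_to_count:
--         name = row[0]
--         if name in name_counter.keys():
--             name_counter[name] += 1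
--         else:
--             name_counter[name] = 1
--     return name_counter
-- ===== SOURCE B (Python) =====
-- def count_names_in_tables(table_to_count):
--     names = [row[0] for row in table_to_count]
--     return {name: names.count(name) for name in dict.fromkeys(names)}
-- ===== Notes on version B (the rewrite author's own statement) =====
-- stated objective: alternative
-- what changed: Replaces the single accumulating dict pass with extract-first-column, ordered dedup of the distinct names, then a count() scan per distinct name.
import Mathlib
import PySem

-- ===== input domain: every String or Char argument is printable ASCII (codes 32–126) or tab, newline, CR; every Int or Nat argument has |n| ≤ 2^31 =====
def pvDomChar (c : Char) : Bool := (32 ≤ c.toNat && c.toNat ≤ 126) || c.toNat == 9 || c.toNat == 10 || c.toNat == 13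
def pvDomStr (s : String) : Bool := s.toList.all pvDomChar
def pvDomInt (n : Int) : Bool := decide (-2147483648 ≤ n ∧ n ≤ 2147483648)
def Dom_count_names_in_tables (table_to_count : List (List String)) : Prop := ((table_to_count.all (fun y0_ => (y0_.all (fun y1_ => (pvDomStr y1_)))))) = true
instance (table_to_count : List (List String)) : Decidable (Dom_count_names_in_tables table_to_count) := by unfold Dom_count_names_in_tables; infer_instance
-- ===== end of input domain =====

-- B replaces A's single accumulating dict pass by: extract the first column, dedup the
-- distinct names in first-occurrence order, then count each distinct name with a scan.


-- ===== PORT A =====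
-- name = row[0]; pyGet? is none exactly where Python raises IndexError (excluded by Pre_);
-- inside Pre_ the .getD "" default is never used.
def count_names_in_tables (table_to_count : List (List String)) : List (String × Int) :=
  (table_to_count.foldl
    (fun name_counter row =>
      let name := (PySem.List.pyGet? row 0).getD ""
      if name_counter.contains name then
        name_counter.insert name (name_counter.getD name 0 + 1)
      else
        name_counter.insert name 1)
    PySem.Dict.empty).items

-- ===== PORT B =====
def count_names_in_tables_alt (table_to_count : List (List String)) : List (String × Int) :=
  let names := table_to_count.map (fun row => (PySem.List.pyGet? row 0).getD "")
  (PySem.List.dedup names).map (fun name => (name, (names.count name : Int)))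

-- ===== PRECONDITION & SPEC =====
-- Pre_ excludes tables containing an empty row: there A (and B) raise IndexError on row[0].
def Pre_count_names_in_tables (table_to_count : List (List String)) : Prop :=
  ∀ row ∈ table_to_count, row ≠ []
instance (table_to_count : List (List String)) : Decidable (Pre_count_names_in_tables table_to_count) := by unfold Pre_count_names_in_tables; infer_instance
def pvWitness_count_names_in_tables : List (List String) := [["alice", "1"], ["bob"], ["alice"]]
def Spec_count_names_in_tables (table_to_count : List (List String)) (out : List (String × Int)) : Prop := out = count_names_in_tables_alt table_to_count
instance (table_to_count : List (List String)) (out : List (String × Int)) : Decidable (Spec_count_names_in_tables table_to_count out) := by unfold Spec_count_names_in_tables; infer_instance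

-- ===== CLAIM (what is proved, stated in full; the proofs are below) =====
def Claim_equal_count_names_in_tables : Prop := ∀ (table_to_count : List (List String)), Dom_count_names_in_tables table_to_count → Pre_count_names_in_tables table_to_count → Spec_count_names_in_tables table_to_count (count_names_in_tables table_to_count)

-- ===== LEMMAS AND PROOFS =====

-- A's two branches are one and the same insert (if the key is absent, getD is the default 0).
lemma count_step_eq (d : PySem.Dict String Int) (x : String) :
    (if d.contains x then d.insert x (d.getD x 0 + 1) else d.insert x 1)
      = d.insert x (d.getD x 0 + 1) := by
  by_cases h : d.contains x = true
  · simp [h]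
  · have h' : d.contains x = false := by simpa using h
    rw [PySem.Dict.getD_of_not_contains d 0 h']
    simp [h']

-- ===== VERDICT (by name: the statement is the Claim_ definition above) =====
theorem count_names_in_tables_spec : Claim_equal_count_names_in_tables := by
  intro t _ _
  unfold Spec_count_names_in_tables count_names_in_tables count_names_in_tables_alt
  simp only [count_step_eq]
  rw [← List.foldl_map (f := fun row => (PySem.List.pyGet? row 0).getD "")
        (g := fun (d : PySem.Dict String Int) x => d.insert x (d.getD x 0 + 1)),
      PySem.Dict.foldl_insert_getD_add_one_eq_counter, PySem.Dict.items_counter]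
  simp [PySem.List.dedup_eq_ofList]
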